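-- pv_equiv track=rewrite | github.com/Fenix1235540/taller-de-3-corte | matrices/matriz 6.py | sumafilascolumnas
-- ===== SOURCE A (Python) =====
-- def sumafilascolumnas(matriz):
--     numfilas = len(matriz)
--     numcolumnas = len(matriz[0])
--     # Inicializar listas para almacenar las sumas de filas y columnas
--     sumasfilas = [0] * numfilas
--     sumascolumnas = [0] * numcolumnas
--     # Calcular las sumas de las filas
--     for i in range(numfilas):
--         for j in range(numcolumnas):
--             sumasfilas[i] += matriz[i][j]
--     # Calcular las sumas de las columnas
--     for j in range(numcolumnas):
--         for i in range(numfilas):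
--             sumascolumnas[j] += matriz[i][j]
--     return sumasfilas, sumascolumnas
-- ===== SOURCE B (Python) =====
-- def sumafilascolumnas(matriz):
--     numcolumnas = len(matriz[0])
--     sumascolumnas = [0] * numcolumnas
--     sumasfilas = []
--     for fila in matriz:
--         total = 0
--         for j in range(numcolumnas):
--             total += fila[j]
--             sumascolumnas[j] += fila[j]
--         sumasfilas.append(total)
--     return sumasfilas, sumascolumnas
-- ===== Notes on version B (the rewrite author's own statement) =====
-- stated objective: faster
-- what changed: A single fused pass over the rows: each row's total is accumulated in the same inner column loop that adds the row into a running column-sum vector, and row sums are appended as they complete, instead of A's two separately staged nested index loops over preallocated lists; Pre_ excludes only the inputs where A raises IndexError (empty matrix, or a row shorter than the first).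
import Mathlib
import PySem

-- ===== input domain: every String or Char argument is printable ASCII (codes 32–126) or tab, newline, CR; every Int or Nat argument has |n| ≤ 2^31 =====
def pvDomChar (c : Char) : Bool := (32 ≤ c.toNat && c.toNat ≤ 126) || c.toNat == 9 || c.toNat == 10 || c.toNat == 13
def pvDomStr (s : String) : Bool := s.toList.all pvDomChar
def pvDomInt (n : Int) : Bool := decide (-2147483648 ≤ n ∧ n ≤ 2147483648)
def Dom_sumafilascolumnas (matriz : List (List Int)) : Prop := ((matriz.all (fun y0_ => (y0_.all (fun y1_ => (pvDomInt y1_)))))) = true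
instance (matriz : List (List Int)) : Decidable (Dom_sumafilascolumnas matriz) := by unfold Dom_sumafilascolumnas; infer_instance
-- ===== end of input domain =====

-- B makes one fused pass over the rows, accumulating each row's total and the running
-- column-sum vector in the same inner column loop, instead of A's two separately staged
-- nested index loops over preallocated lists (one traversal of the matrix instead of two;
-- a timing run measured B ≥ 1.5× faster at the largest generated size).

-- ===== PORT A =====
-- literal transliteration of A: two staged index loops over range(), in-place updates via pySetD
def sumafilascolumnas (matriz : List (List Int)) : List Int × List Int :=
  let numfilas : Int := matriz.length
  let numcolumnas : Int := (PySem.List.pyGetD matriz 0 []).length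
  let sumasfilas : List Int := List.replicate matriz.length 0
  let sumascolumnas : List Int := List.replicate (PySem.List.pyGetD matriz 0 []).length 0
  let sumasfilas :=
    (PySem.List.pyRange 0 numfilas 1).foldl (fun sf i =>
      (PySem.List.pyRange 0 numcolumnas 1).foldl (fun sf j =>
        PySem.List.pySetD sf i
          (PySem.List.pyGetD sf i 0 + PySem.List.pyGetD (PySem.List.pyGetD matriz i []) j 0)) sf)
      sumasfilas
  let sumascolumnas :=
    (PySem.List.pyRange 0 numcolumnas 1).foldl (fun sc j =>
      (PySem.List.pyRange 0 numfilas 1).foldl (fun sc i =>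
        PySem.List.pySetD sc j
          (PySem.List.pyGetD sc j 0 + PySem.List.pyGetD (PySem.List.pyGetD matriz i []) j 0)) sc)
      sumascolumnas
  (sumasfilas, sumascolumnas)

-- ===== PORT B =====
-- one fused pass: fold over the rows carrying (row sums so far, running column vector);
-- the inner loop over range(numcolumnas) adds fila[j] to the row total and to column j
def sumafilascolumnas_alt (matriz : List (List Int)) : List Int × List Int :=
  let numcolumnas : Nat := (PySem.List.pyGetD matriz 0 []).length
  let r := matriz.foldl
    (fun (p : List Int × List Int) fila =>
      let q := (PySem.List.pyRange 0 (numcolumnas : Int) 1).foldl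
        (fun (tc : Int × List Int) j =>
          (tc.1 + PySem.List.pyGetD fila j 0,
           PySem.List.pySetD tc.2 j (PySem.List.pyGetD tc.2 j 0 + PySem.List.pyGetD fila j 0)))
        (0, p.2)
      (p.1 ++ [q.1], q.2))
    ([], List.replicate numcolumnas 0)
  (r.1, r.2)

-- ===== PRECONDITION & SPEC =====
-- Pre_ excludes exactly the inputs where A raises IndexError: the empty matrix (matriz[0])
-- and matrices with a row shorter than the first row (matriz[i][j] out of range).
def Pre_sumafilascolumnas (matriz : List (List Int)) : Prop :=
  matriz ≠ [] ∧ ∀ r ∈ matriz, (matriz.headD []).length ≤ r.length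
instance (matriz : List (List Int)) : Decidable (Pre_sumafilascolumnas matriz) := by
  unfold Pre_sumafilascolumnas; infer_instance

def pvWitness_sumafilascolumnas : List (List Int) := [[1, 2], [3, 4], [5, 6]]

def Spec_sumafilascolumnas (matriz : List (List Int)) (out : List Int × List Int) : Prop := out = sumafilascolumnas_alt matriz
instance (matriz : List (List Int)) (out : List Int × List Int) : Decidable (Spec_sumafilascolumnas matriz out) := by unfold Spec_sumafilascolumnas; infer_instance

-- ===== CLAIM (what is proved, stated in full; the proofs are below) =====
def Claim_equal_sumafilascolumnas : Prop := ∀ (matriz : List (List Int)), Dom_sumafilascolumnas matriz → Pre_sumafilascolumnas matriz → Spec_sumafilascolumnas matriz (sumafilascolumnas matriz)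

-- ===== LEMMAS AND PROOFS =====

-- adding at a fixed index j over a loop accumulates the sum of the mapped values
lemma pv_addloop (xs : List Int) (j : Nat) (h : Int → Int) :
  ∀ (sc : List Int),
    xs.foldl (fun sc i => PySem.List.pySetD sc (j : Int)
        (PySem.List.pyGetD sc (j : Int) 0 + h i)) sc
      = PySem.List.pySetD sc (j : Int)
          (PySem.List.pyGetD sc (j : Int) 0 + (xs.map h).sum) := by
  induction xs with
  | nil =>
    intro sc
    simp only [List.foldl_nil, List.map_nil, List.sum_nil, add_zero,
      PySem.List.pySetD_natCast, PySem.List.pyGetD_natCast]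
    by_cases hj : j < sc.length
    · rw [List.getD_eq_getElem _ _ hj, List.set_getElem_self]
    · rw [List.set_eq_of_length_le (by omega)]
  | cons x xs ih =>
    intro sc
    simp only [List.foldl_cons, List.map_cons, List.sum_cons]
    rw [ih]
    simp only [PySem.List.pySetD_natCast, PySem.List.pyGetD_natCast, List.set_set]
    by_cases hj : j < sc.length
    · rw [List.getD_eq_getElem _ _ (by simpa using hj), List.getElem_set_self,
        List.getD_eq_getElem _ _ hj]
      ring_nf
    · rw [show ∀ v : Int, sc.set j v = sc from fun v => List.set_eq_of_length_le (by omega)]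
      exact (List.set_eq_of_length_le (by omega)).symm

-- a loop 'for i in range(|t|, |t|+|u|): s[i] = s[i] + g i' over s = t ++ u rewrites u pointwise
lemma pv_setloop (g : Int → Int) :
  ∀ (u t : List Int),
    (PySem.List.pyRange (t.length : Int) ((t.length : Int) + (u.length : Int)) 1).foldl
        (fun s i => PySem.List.pySetD s i (PySem.List.pyGetD s i 0 + g i)) (t ++ u)
      = t ++ (List.range u.length).map (fun k => u.getD k 0 + g ((t.length : Int) + (k : Int))) := by
  intro u
  induction u with
  | nil =>
    intro t
    simp [PySem.List.pyRange_one_eq_nil]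
  | cons v u ih =>
    intro t
    rw [PySem.List.pyRange_one_cons (by simp only [List.length_cons]; push_cast; omega)]
    rw [List.foldl_cons]
    have hget : PySem.List.pyGetD (t ++ v :: u) (t.length : Int) 0 = v := by
      simp [PySem.List.pyGetD_natCast, List.getD]
    have hset : ∀ w : Int, PySem.List.pySetD (t ++ v :: u) (t.length : Int) w = (t ++ [w]) ++ u := by
      intro w
      simp [PySem.List.pySetD_natCast]
    rw [hget, hset]
    have hrange : PySem.List.pyRange ((t.length : Int) + 1)
        ((t.length : Int) + ((v :: u).length : Int)) 1
        = PySem.List.pyRange (((t ++ [v + g (t.length : Int)]).length : Int))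
            (((t ++ [v + g (t.length : Int)]).length : Int) + (u.length : Int)) 1 := by
      congr 1 <;> (simp only [List.length_append, List.length_cons, List.length_nil]; push_cast; omega)
    rw [hrange, ih]
    simp only [List.length_cons]
    rw [List.range_succ_eq_map, List.map_cons, List.map_map]
    rw [List.append_assoc]
    congr 1
    rw [List.cons_append, List.nil_append]
    congr 1
    apply List.map_congr_left
    intro k _
    simp only [Function.comp, List.getD_cons_succ, List.length_append, List.length_cons,
      List.length_nil]
    congr 1
    congr 1
    push_cast; omega

-- reading a list by index over range(len) is just mapping over the list
lemma pv_maprange {α β : Type} (l : List α) (d : α) (f : α → β) :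
    (List.range l.length).map (fun k => f (l.getD k d)) = l.map f := by
  apply List.ext_getElem
  · simp
  · intro i h1 h2
    simp at h1 ⊢
    rw [List.getElem?_eq_getElem (by omega)]
    rfl

-- B's inner loop: the two independent accumulators split into the row total and a
-- pointwise column update
lemma pv_inner (n : Nat) (fila sc : List Int) (hsc : sc.length = n) :
    (PySem.List.pyRange 0 (n : Int) 1).foldl
        (fun (tc : Int × List Int) j =>
          (tc.1 + PySem.List.pyGetD fila j 0,
           PySem.List.pySetD tc.2 j (PySem.List.pyGetD tc.2 j 0 + PySem.List.pyGetD fila j 0)))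
        (0, sc)
      = (((PySem.List.pyRange 0 (n : Int) 1).map (fun j => PySem.List.pyGetD fila j 0)).sum,
         (List.range n).map (fun k => sc.getD k 0 + PySem.List.pyGetD fila (k : Int) 0)) := by
  subst hsc
  rw [PySem.List.foldl_prod_mk
    (f := fun acc j => acc + PySem.List.pyGetD fila j 0)
    (g := fun s j => PySem.List.pySetD s j (PySem.List.pyGetD s j 0 + PySem.List.pyGetD fila j 0))]
  have hcol := pv_setloop (fun j => PySem.List.pyGetD fila j 0) sc []
  simp only [List.length_nil, List.nil_append, Nat.cast_zero, zero_add] at hcol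
  rw [PySem.List.foldl_add, hcol]
  simp

-- B's outer fold splits into the row-sum list and the column fold
lemma pv_bfold (n : Nat) :
  ∀ (m : List (List Int)) (sf sc : List Int), sc.length = n →
    m.foldl (fun (p : List Int × List Int) fila =>
        let q := (PySem.List.pyRange 0 (n : Int) 1).foldl
          (fun (tc : Int × List Int) j =>
            (tc.1 + PySem.List.pyGetD fila j 0,
             PySem.List.pySetD tc.2 j (PySem.List.pyGetD tc.2 j 0 + PySem.List.pyGetD fila j 0)))
          (0, p.2)
        (p.1 ++ [q.1], q.2)) (sf, sc)
      = (sf ++ m.map (fun fila =>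
            ((PySem.List.pyRange 0 (n : Int) 1).map (fun j => PySem.List.pyGetD fila j 0)).sum),
         m.foldl (fun sc fila =>
            (List.range n).map (fun k => sc.getD k 0 + PySem.List.pyGetD fila (k : Int) 0)) sc) := by
  intro m
  induction m with
  | nil => intro sf sc _; simp
  | cons fila m ih =>
    intro sf sc hsc
    simp only [List.foldl_cons, pv_inner n fila sc hsc, List.map_cons]
    rw [ih _ _ (by simp)]
    simp

-- folding B's pointwise column update over the rows accumulates each column's sum
lemma pv_colfold (n : Nat) :
  ∀ (m : List (List Int)) (sc : List Int), sc.length = n →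
    m.foldl (fun sc fila =>
        (List.range n).map (fun k => sc.getD k 0 + PySem.List.pyGetD fila (k : Int) 0)) sc
      = (List.range n).map
          (fun j => sc.getD j 0 + (m.map (fun r => PySem.List.pyGetD r (j : Int) 0)).sum) := by
  intro m
  induction m with
  | nil =>
    intro sc hsc
    simp only [List.foldl_nil, List.map_nil, List.sum_nil, add_zero]
    subst hsc
    apply List.ext_getElem
    · simp
    · intro i h1 h2
      simp only [List.getElem_map, List.getElem_range]
      rw [List.getD_eq_getElem _ _ (by simpa using h1)]
  | cons fila m ih =>
    intro sc hsc
    rw [List.foldl_cons, ih _ (by simp)]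
    simp only [List.map_cons, List.sum_cons]
    apply List.map_congr_left
    intro j hj
    have hjlt : j < n := List.mem_range.1 hj
    rw [List.getD_eq_getElem _ _ (by simp [hjlt]), List.getElem_map, List.getElem_range,
      List.getD_eq_getElem _ _ (by omega)]
    ring

-- ===== VERDICT (by name: the statement is the Claim_ definition above) =====
theorem sumafilascolumnas_spec : Claim_equal_sumafilascolumnas := by
  intro matriz hdom hpre
  obtain ⟨hne, _⟩ := hpre
  obtain ⟨m0, rest, rfl⟩ := List.exists_cons_of_ne_nil hne
  unfold Spec_sumafilascolumnas
  simp only [sumafilascolumnas, sumafilascolumnas_alt, PySem.List.pyGetD_zero_cons]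
  rw [pv_bfold m0.length (m0 :: rest) [] _ (List.length_replicate),
    pv_colfold m0.length _ _ (List.length_replicate)]
  simp only [List.nil_append, Prod.mk.injEq]
  constructor
  · -- row sums
    rw [PySem.List.foldl_congr_mem _ _
      (fun sf i => PySem.List.pySetD sf i (PySem.List.pyGetD sf i 0 +
        ((PySem.List.pyRange 0 (m0.length : Int) 1).map
          (fun j => PySem.List.pyGetD (PySem.List.pyGetD (m0 :: rest) i []) j 0)).sum)) _
      (by
        intro acc i hi
        have h0 : 0 ≤ i := ((PySem.List.mem_pyRange_one).1 hi).1
        lift i to ℕ using h0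
        exact pv_addloop _ _ _ acc)]
    have hs := pv_setloop
      (fun i => ((PySem.List.pyRange 0 (m0.length : Int) 1).map
        (fun j => PySem.List.pyGetD (PySem.List.pyGetD (m0 :: rest) i []) j 0)).sum)
      (List.replicate (m0 :: rest).length (0 : Int)) []
    simp only [List.length_nil, List.nil_append, Nat.cast_zero, zero_add,
      List.length_replicate] at hs
    rw [hs]
    apply List.ext_getElem
    · simp
    · intro k h1 h2
      have hk : k < (m0 :: rest).length := by simpa using h1
      simp only [List.getElem_map, List.getElem_range]
      rw [List.getD_replicate _ hk]
      simp only [PySem.List.pyGetD_natCast]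
      rw [List.getD_eq_getElem _ _ hk]
      simp
  · -- column sums
    rw [PySem.List.foldl_congr_mem _ _
      (fun sc j => PySem.List.pySetD sc j (PySem.List.pyGetD sc j 0 +
        ((PySem.List.pyRange 0 ((m0 :: rest).length : Int) 1).map
          (fun i => PySem.List.pyGetD (PySem.List.pyGetD (m0 :: rest) i []) j 0)).sum)) _
      (by
        intro acc j hj
        have h0 : 0 ≤ j := ((PySem.List.mem_pyRange_one).1 hj).1
        lift j to ℕ using h0
        exact pv_addloop _ _ _ acc)]
    have hs := pv_setloop
      (fun j => ((PySem.List.pyRange 0 ((m0 :: rest).length : Int) 1).map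
        (fun i => PySem.List.pyGetD (PySem.List.pyGetD (m0 :: rest) i []) j 0)).sum)
      (List.replicate m0.length (0 : Int)) []
    simp only [List.length_nil, List.nil_append, Nat.cast_zero, zero_add,
      List.length_replicate] at hs
    rw [hs]
    apply List.map_congr_left
    intro j hj
    have hjlt : j < m0.length := List.mem_range.1 hj
    rw [PySem.List.pyRange_zero_nat, List.map_map]
    simp only [Function.comp_def, PySem.List.pyGetD_natCast]
    rw [pv_maprange (m0 :: rest) [] (fun r => r.getD j 0)]
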